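-- pv_equiv track=rewrite | github.com/marie-lee/Matching-back | src/utils/matching/matching.py | portfolio_to_text
-- ===== SOURCE A (Python) =====
-- def process_description(description):
--     sentences = description.split('/n')
--     processed_sentences = []
--     # 문장이 하나만 있는 경우
--     if len(sentences) == 1:
--         return description
--     for sentence in sentences:
--         if len(sentence) > 50:
--             for i in range(0, len(sentence), 50):
--                 processed_sentences.append(sentence[i:i+50])
--         else:
--             processed_sentences.append(sentence)
--     return processed_sentences
--
-- def portfolio_to_text(portfolio):
--     processed_texts = []
--     for project in portfolio:
--         project_texts = []
--         project_texts.append("".join(process_description(project['introduction'])) if project.get('introduction') else '') # 프로젝트 소개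
--         project_texts.append("".join(process_description(project['stack'])) if project.get('stack') else '') # 스택 정보
--         project_texts.append("".join(process_description(project['role'])) if project.get('role') else '')  # 역할 정보
--         project_texts.append(f"contribution: {project.get('contribution', '')}" if project.get('contribution') else '')    # 기여도 정보
--         processed_texts.append(project_texts)
--     return processed_texts
-- ===== SOURCE B (Python) =====
-- def portfolio_to_text(portfolio):
--     # Each joined chunked description is just the text with '/n' removed:
--     # splitting on '/n' and re-joining the 50-char slices reconstructs it.
--     return [
--         [(project.get(f) or '').replace('/n', '') for f in ('introduction', 'stack', 'role')]
--         + [f"contribution: {c}" if (c := project.get('contribution') or '') else '']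
--         for project in portfolio
--     ]
-- ===== Notes on version B (the rewrite author's own statement) =====
-- stated objective: simpler
-- what changed: Eliminates process_description entirely: since joining the 50-char chunks of the '/n'-split sentences reconstructs the text without the separators, each field becomes a single str.replace('/n',''), built in one comprehension instead of split/chunk/join loops.
import Mathlib
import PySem

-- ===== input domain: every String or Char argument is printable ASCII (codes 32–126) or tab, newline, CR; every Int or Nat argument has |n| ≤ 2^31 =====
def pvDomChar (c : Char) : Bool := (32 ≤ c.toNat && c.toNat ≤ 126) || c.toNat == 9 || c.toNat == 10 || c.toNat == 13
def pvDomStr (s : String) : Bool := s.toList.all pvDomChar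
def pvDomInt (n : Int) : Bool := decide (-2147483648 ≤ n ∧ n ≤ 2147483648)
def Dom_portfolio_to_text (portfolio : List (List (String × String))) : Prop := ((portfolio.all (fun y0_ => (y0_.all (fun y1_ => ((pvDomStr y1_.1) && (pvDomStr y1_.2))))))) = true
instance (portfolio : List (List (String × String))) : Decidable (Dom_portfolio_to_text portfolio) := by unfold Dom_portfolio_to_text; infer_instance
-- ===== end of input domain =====

-- B replaces A's split/50-char-chunk/join pipeline with a single "/n"-removing replace per field (return value proved equal).


-- ===== PORT A =====
-- Python truthiness of project.get(k): present and non-empty.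
def pyTruthy (o : Option String) : Bool :=
  match o with
  | none => false
  | some s => s ≠ ""

def process_description (description : String) : List String :=
  -- sep "/n" is non-empty, so split? never returns none; getD [] is unreachable
  let sentences := (PySem.Str.split? description "/n").getD []
  if sentences.length = 1 then
    [description]  -- Python returns the raw string; its sole consumer "".join(…) yields the same characters either way
  else
    sentences.foldl (fun processed_sentences sentence =>
      if (50 : Int) < PySem.Str.len sentence then
        (PySem.List.pyRange 0 (PySem.Str.len sentence) 50).foldl
          (fun acc i => acc ++ [PySem.Str.slice sentence (some i) (some (i + 50))])
          processed_sentences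
      else processed_sentences ++ [sentence]) []

def portfolio_to_text (portfolio : List (List (String × String))) : List (List String) :=
  portfolio.foldl (fun processed_texts project =>
    -- project['k'] is read only under the truthiness guard, where it equals getD project k ""
    let t1 := if pyTruthy (PySem.Dict.get? ⟨project⟩ "introduction") then
        PySem.Str.join "" (process_description (PySem.Dict.getD ⟨project⟩ "introduction" "")) else ""
    let t2 := if pyTruthy (PySem.Dict.get? ⟨project⟩ "stack") then
        PySem.Str.join "" (process_description (PySem.Dict.getD ⟨project⟩ "stack" "")) else ""
    let t3 := if pyTruthy (PySem.Dict.get? ⟨project⟩ "role") then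
        PySem.Str.join "" (process_description (PySem.Dict.getD ⟨project⟩ "role" "")) else ""
    -- f-string "contribution: {…}" ported as a ""-join of the two pieces (kernel-transparent concatenation)
    let t4 := if pyTruthy (PySem.Dict.get? ⟨project⟩ "contribution") then
        PySem.Str.join "" ["contribution: ", PySem.Dict.getD ⟨project⟩ "contribution" ""] else ""
    processed_texts ++ [[t1, t2, t3, t4]]) []

-- ===== PORT B =====
def replField (project : List (String × String)) (f : String) : String :=
  PySem.Str.replace (PySem.Dict.getD ⟨project⟩ f "") "/n" ""

def portfolio_to_text_alt (portfolio : List (List (String × String))) : List (List String) :=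
  portfolio.map (fun project =>
    (["introduction", "stack", "role"].map (replField project)) ++
    [ let c := PySem.Dict.getD ⟨project⟩ "contribution" ""
      if c ≠ "" then PySem.Str.join "" ["contribution: ", c] else "" ])

-- ===== PRECONDITION & SPEC =====
def Spec_portfolio_to_text (portfolio : List (List (String × String))) (out : List (List String)) : Prop := out = portfolio_to_text_alt portfolio
instance (portfolio : List (List (String × String))) (out : List (List String)) : Decidable (Spec_portfolio_to_text portfolio out) := by unfold Spec_portfolio_to_text; infer_instance

-- ===== CLAIM (what is proved, stated in full; the proofs are below) =====
def Claim_equal_portfolio_to_text : Prop := ∀ (portfolio : List (List (String × String))), Dom_portfolio_to_text portfolio → Spec_portfolio_to_text portfolio (portfolio_to_text portfolio)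

-- ===== LEMMAS AND PROOFS =====

lemma go0 (sep l cur : List Char) (acc : List (List Char)) :
    PySem.Chars.splitOn.go sep 0 l cur acc = ((cur.reverse ++ l) :: acc).reverse := by
  rw [PySem.Chars.splitOn.go.eq_def]
lemma go_nil (sep cur : List Char) (fuel : Nat) (acc : List (List Char)) :
    PySem.Chars.splitOn.go sep (fuel+1) [] cur acc = (cur.reverse :: acc).reverse := by
  rw [PySem.Chars.splitOn.go.eq_def]
lemma go_cons (sep cur : List Char) (fuel : Nat) (c : Char) (rest : List Char) (acc : List (List Char)) :
    PySem.Chars.splitOn.go sep (fuel+1) (c :: rest) cur acc =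
      if sep.isPrefixOf (c :: rest) then
        PySem.Chars.splitOn.go sep fuel (List.drop sep.length (c :: rest)) [] (cur.reverse :: acc)
      else PySem.Chars.splitOn.go sep fuel rest (c :: cur) acc := by
  rw [PySem.Chars.splitOn.go.eq_def]
lemma rgo0 (sep l acc : List Char) :
    PySem.Chars.replace.go sep [] 0 l acc = acc.reverse ++ l := by
  rw [PySem.Chars.replace.go.eq_def]
lemma rgo_nil (sep acc : List Char) (fuel : Nat) :
    PySem.Chars.replace.go sep [] (fuel+1) [] acc = acc.reverse := by
  rw [PySem.Chars.replace.go.eq_def]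
lemma rgo_cons (sep acc : List Char) (fuel : Nat) (c : Char) (t : List Char) :
    PySem.Chars.replace.go sep [] (fuel+1) (c :: t) acc =
      if sep.isPrefixOf (c :: t) then
        PySem.Chars.replace.go sep [] fuel (List.drop sep.length (c :: t)) acc
      else PySem.Chars.replace.go sep [] fuel t (c :: acc) := by
  rw [PySem.Chars.replace.go.eq_def]; simp


lemma join_nil_flatten (parts : List (List Char)) : PySem.Chars.join [] parts = parts.flatten := by
  induction parts with
  | nil => simp [PySem.Chars.join, List.intercalate]
  | cons p rest ih =>
    cases rest with
    | nil => simp [PySem.Chars.join, List.intercalate]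
    | cons q t =>
      have h := PySem.Chars.join_cons_cons [] p q t
      simp only [PySem.Chars.join] at h ih ⊢
      simp [h, ih]

lemma splitOn_go_acc (sep : List Char) :
    ∀ (fuel : Nat) (l cur : List Char) (acc : List (List Char)),
      PySem.Chars.splitOn.go sep fuel l cur acc =
        acc.reverse ++ PySem.Chars.splitOn.go sep fuel l cur [] := by
  intro fuel
  induction fuel with
  | zero => intro l cur acc; simp [go0]
  | succ fuel ih =>
    intro l cur acc
    cases l with
    | nil => simp [go_nil]
    | cons c rest =>
      rw [go_cons, go_cons]
      split
      · rw [ih _ _ (cur.reverse :: acc), ih _ _ [cur.reverse]]; simp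
      · rw [ih _ _ acc]

lemma splitOn_go_ne_nil (sep : List Char) :
    ∀ (fuel : Nat) (l cur : List Char) (acc : List (List Char)),
      PySem.Chars.splitOn.go sep fuel l cur acc ≠ [] := by
  intro fuel
  induction fuel with
  | zero => intro l cur acc; simp [go0]
  | succ fuel ih =>
    intro l cur acc
    cases l with
    | nil => simp [go_nil]
    | cons c rest => rw [go_cons]; split <;> apply ih

lemma replace_go_acc (sep : List Char) :
    ∀ (fuel : Nat) (l acc : List Char),
      PySem.Chars.replace.go sep [] fuel l acc =
        acc.reverse ++ PySem.Chars.replace.go sep [] fuel l [] := by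
  intro fuel
  induction fuel with
  | zero => intro l acc; simp [rgo0]
  | succ fuel ih =>
    intro l acc
    cases l with
    | nil => simp [rgo_nil]
    | cons c t =>
      rw [rgo_cons, rgo_cons]
      split
      · rw [ih]
      · rw [ih _ (c :: acc), ih _ [c]]; simp

lemma splitOn_go_flatten (sep : List Char) (hsep : sep ≠ []) :
    ∀ (fuel : Nat) (l cur : List Char), l.length ≤ fuel →
      (PySem.Chars.splitOn.go sep (fuel + 1) l cur []).flatten =
        cur.reverse ++ PySem.Chars.replace.go sep [] fuel l [] := by
  intro fuel
  induction fuel with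
  | zero =>
    intro l cur h
    have : l = [] := by cases l <;> simp_all
    subst this
    simp [go_nil, rgo0]
  | succ fuel ih =>
    intro l cur h
    cases l with
    | nil => simp [go_nil, rgo_nil]
    | cons c rest =>
      rw [go_cons, rgo_cons]
      split
      · rename_i hpre
        rw [splitOn_go_acc]
        have hlen : (List.drop sep.length (c :: rest)).length ≤ fuel := by
          have hp := (List.isPrefixOf_iff_prefix.mp hpre).length_le
          have : 1 ≤ sep.length := by cases sep <;> simp_all
          simp [List.length_drop]
          simp at h
          omega
        simp only [List.flatten_append]
        rw [ih _ _ hlen]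
        simp
      · rw [ih _ _ (by simpa using h), replace_go_acc sep fuel rest [c]]
        simp

lemma splitOn_flatten (sep cs : List Char) (hsep : sep ≠ []) :
    (PySem.Chars.splitOn cs sep).flatten = PySem.Chars.replace cs sep [] := by
  have h := splitOn_go_flatten sep hsep cs.length cs [] le_rfl
  simp only [PySem.Chars.splitOn, PySem.Chars.replace]
  rw [if_neg (by simpa using hsep)]
  simpa using h

lemma splitOn_go_singleton (sep : List Char) :
    ∀ (fuel : Nat) (l cur x : List Char),
      PySem.Chars.splitOn.go sep (fuel + 1) l cur [] = [x] → x = cur.reverse ++ l := by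
  intro fuel
  induction fuel with
  | zero =>
    intro l cur x h
    cases l with
    | nil => rw [go_nil] at h; simp at h; simp [← h]
    | cons c rest =>
      rw [go_cons] at h
      split at h
      · rw [splitOn_go_acc] at h; simp [go0] at h
      · rw [go0] at h; simp at h; simp [← h]
  | succ fuel ih =>
    intro l cur x h
    cases l with
    | nil => rw [go_nil] at h; simp at h; simp [← h]
    | cons c rest =>
      rw [go_cons] at h
      split at h
      · rw [splitOn_go_acc] at h
        cases hgo : PySem.Chars.splitOn.go sep (fuel+1) (List.drop sep.length (c :: rest)) [] [] with
        | nil => exact absurd hgo (splitOn_go_ne_nil sep (fuel+1) _ [] [])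
        | cons y ys => rw [hgo] at h; simp at h
      · have := ih rest (c :: cur) x h
        simp [this]

lemma splitOn_singleton (sep cs x : List Char) (h : PySem.Chars.splitOn cs sep = [x]) : x = cs := by
  simp only [PySem.Chars.splitOn] at h
  simpa using splitOn_go_singleton sep cs.length cs [] x h

lemma pyRange_pos_cons (a b s : Int) (hs : 0 < s) (hab : a < b) :
    PySem.List.pyRange a b s = a :: PySem.List.pyRange (a + s) b s := by
  rw [PySem.List.pyRange_of_pos _ _ hs, PySem.List.pyRange_of_pos _ _ hs]
  rw [if_pos hab]
  have hkey : b - a + s - 1 = (b - a - 1) + 1 * s := by ring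
  have h1 : (b - a + s - 1) / s = (b - a - 1) / s + 1 := by
    rw [hkey, Int.add_mul_ediv_right _ _ (by omega)]
  have hnn : 0 ≤ (b - a - 1) / s := Int.ediv_nonneg (by omega) (by omega)
  rw [h1]
  have h2 : ((b - a - 1) / s + 1).toNat = ((b - a - 1) / s).toNat + 1 := by omega
  rw [h2, List.range_succ_eq_map]
  simp only [List.map_cons, List.map_map]
  have h3 : b - (a + s) + s - 1 = b - a - 1 := by ring
  have h4 : (if a + s < b then ((b - (a + s) + s - 1) / s).toNat else 0) = ((b - a - 1) / s).toNat := by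
    rw [h3]
    split
    · rfl
    · rename_i hnb
      have : (b - a - 1) / s = 0 := Int.ediv_eq_zero_of_lt (by omega) (by omega)
      omega
  rw [h4]
  refine List.cons_eq_cons.mpr ⟨by simp, ?_⟩
  apply List.map_congr_left
  intro k _
  simp [Function.comp]
  ring

lemma pyRange_pos_nil (a b s : Int) (hs : 0 < s) (hab : ¬ a < b) :
    PySem.List.pyRange a b s = [] := by
  rw [PySem.List.pyRange_of_pos _ _ hs, if_neg hab]
  simp

lemma chunk_flatten (k : Nat) (hk : 0 < k) (l : List Char) :
    ∀ (m j : Nat), l.length ≤ j + m →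
      (((PySem.List.pyRange (j : Int) ((l.length : Nat) : Int) (k : Int)).map
          (fun i => PySem.List.slice l (some i) (some (i + (k : Int))))).flatten) = l.drop j := by
  intro m
  induction m with
  | zero =>
    intro j h
    rw [pyRange_pos_nil _ _ _ (by exact_mod_cast hk) (by exact_mod_cast (by omega : ¬ (j < l.length)))]
    simp only [List.map_nil, List.flatten_nil]
    exact (List.drop_eq_nil_of_le (by omega)).symm
  | succ m ih =>
    intro j h
    by_cases hj : l.length ≤ j
    · rw [pyRange_pos_nil _ _ _ (by exact_mod_cast hk) (by exact_mod_cast (by omega : ¬ (j < l.length)))]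
      simp only [List.map_nil, List.flatten_nil]
      exact (List.drop_eq_nil_of_le (by omega)).symm
    · rw [pyRange_pos_cons _ _ _ (by exact_mod_cast hk) (by exact_mod_cast (by omega : j < l.length))]
      simp only [List.map_cons, List.flatten_cons]
      rw [PySem.List.slice_natCast_add]
      have hcast : (j : Int) + (k : Int) = ((j + k : Nat) : Int) := by push_cast; ring
      rw [hcast, ih (j + k) (by omega)]
      have hdd : List.drop (j + k) l = List.drop k (List.drop j l) := by
        rw [List.drop_drop]
      rw [hdd, List.take_append_drop]


def chunkOrSelf (s' : String) : List String :=
  if (50 : Int) < PySem.Str.len s' then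
    (PySem.List.pyRange 0 (PySem.Str.len s') 50).map
      (fun i => PySem.Str.slice s' (some i) (some (i + 50)))
  else [s']

lemma flat_chunkOrSelf (s' : String) :
    ((chunkOrSelf s').map String.toList).flatten = s'.toList := by
  unfold chunkOrSelf
  split
  · have h50 : (0:Nat) < 50 := by omega
    have := chunk_flatten 50 h50 s'.toList s'.toList.length 0 (by omega)
    simp only [Nat.cast_zero] at this
    rw [List.map_map]
    have heq : (String.toList ∘ fun i => PySem.Str.slice s' (some i) (some (i + 50)))
        = fun i => PySem.List.slice s'.toList (some i) (some (i + (50:Nat))) := by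
      funext i
      simp [PySem.Str.toList_slice]
    rw [heq]
    have hlen : PySem.Str.len s' = ((s'.toList.length : Nat) : Int) := by
      simp [PySem.Str.len]
    rw [hlen]
    simpa using this
  · simp

lemma flat_flatMap (ss : List String) :
    ((ss.flatMap chunkOrSelf).map String.toList).flatten = (ss.map String.toList).flatten := by
  induction ss with
  | nil => simp
  | cons a t ih => simp [List.flatMap_cons, flat_chunkOrSelf, ih]

lemma join_process_description (s : String) :
    PySem.Str.join "" (process_description s) = PySem.Str.replace s "/n" "" := by
  apply String.toList_inj.mp
  rw [PySem.Str.toList_join, PySem.Str.toList_replace]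
  have hsepne : ("/n".toList : List Char) ≠ [] := by decide
  have hsent : (PySem.Str.split? s "/n").getD [] =
      (PySem.Chars.splitOn s.toList "/n".toList).map String.ofList := by
    simp [PySem.Str.split?, PySem.Chars.split?]
  unfold process_description
  simp only [hsent]
  have h0 : ("".toList : List Char) = [] := rfl
  rw [h0]
  rw [← splitOn_flatten "/n".toList s.toList hsepne]
  by_cases hlen : ((PySem.Chars.splitOn s.toList "/n".toList).map String.ofList).length = 1
  · rw [if_pos hlen]
    simp only [List.length_map] at hlen
    obtain ⟨y, hy⟩ := List.length_eq_one_iff.mp hlen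
    rw [hy]
    have := splitOn_singleton "/n".toList s.toList y hy
    simp [this]
  · rw [if_neg hlen]
    have hstep : ∀ (acc : List String) (s' : String),
        (if (50 : Int) < PySem.Str.len s' then
          (PySem.List.pyRange 0 (PySem.Str.len s') 50).foldl
            (fun acc2 i => acc2 ++ [PySem.Str.slice s' (some i) (some (i + 50))]) acc
        else acc ++ [s']) = acc ++ chunkOrSelf s' := by
      intro acc s'
      unfold chunkOrSelf
      split
      · rw [PySem.List.foldl_append_singleton_eq_map]
      · rfl
    rw [PySem.List.foldl_congr_mem _ _ (fun acc s' => acc ++ chunkOrSelf s') _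
        (fun acc x _ => hstep acc x)]
    rw [PySem.List.foldl_append_eq_flatMap]
    rw [List.nil_append, join_nil_flatten, flat_flatMap]
    simp [List.map_map, Function.comp_def]


lemma field_eq (project : List (String × String)) (f : String) :
    (if pyTruthy (PySem.Dict.get? ⟨project⟩ f) then
        PySem.Str.join "" (process_description (PySem.Dict.getD ⟨project⟩ f "")) else "")
      = replField project f := by
  unfold replField
  have hrepl : PySem.Str.replace "" "/n" "" = "" := by decide
  cases ho : PySem.Dict.get? (⟨project⟩ : PySem.Dict String String) f with
  | none => simp [pyTruthy, PySem.Dict.getD, ho, hrepl]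
  | some v =>
    by_cases hv : v = ""
    · simp [pyTruthy, PySem.Dict.getD, ho, hv, hrepl]
    · simp [pyTruthy, PySem.Dict.getD, ho, hv, join_process_description]

lemma contribution_eq (project : List (String × String)) :
    (if pyTruthy (PySem.Dict.get? ⟨project⟩ "contribution") then
        PySem.Str.join "" ["contribution: ", PySem.Dict.getD ⟨project⟩ "contribution" ""] else "")
      = (let c := PySem.Dict.getD (⟨project⟩ : PySem.Dict String String) "contribution" ""
         if c ≠ "" then PySem.Str.join "" ["contribution: ", c] else "") := by
  cases ho : PySem.Dict.get? (⟨project⟩ : PySem.Dict String String) "contribution" with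
  | none => simp [pyTruthy, PySem.Dict.getD, ho]
  | some v =>
    by_cases hv : v = ""
    · simp [pyTruthy, PySem.Dict.getD, ho, hv]
    · simp [pyTruthy, PySem.Dict.getD, ho, hv]

-- ===== VERDICT (by name: the statement is the Claim_ definition above) =====
theorem portfolio_to_text_spec : Claim_equal_portfolio_to_text := by
  intro portfolio _
  unfold Spec_portfolio_to_text portfolio_to_text portfolio_to_text_alt
  rw [PySem.List.foldl_append_singleton_eq_map]
  simp only [List.nil_append, List.map, List.cons_append, List.nil_append]
  refine List.map_congr_left ?_
  intro project _
  simp only [field_eq, contribution_eq, replField]
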